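-- pv_equiv track=rewrite | github.com/nicofirst1/CorpusCompass | corpuscompass/view/utils.py | split_string_with_token_and_identifier
-- ===== SOURCE A (Python) =====
-- def split_string_with_token_and_identifier(input_string):
--     substrings = ["token", "identifier"]
--     result = []
--     i = 0
--
--     while i < len(input_string):
--         # Check if the current position matches any of the special substrings
--         matched = False
--         for substring in substrings:
--             if input_string[i : i + len(substring)] == substring:
--                 result.append(substring)
--                 i += len(substring)
--                 matched = True
--                 break
--         if not matched:
--             result.append(input_string[i])
--             i += 1
--
--     return result
-- ===== SOURCE B (Python) =====
-- def split_string_with_token_and_identifier(input_string):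
--     # Jump-based scan: find the next occurrence of either keyword, emit the
--     # intervening characters in bulk, then the keyword; no per-char matching.
--     result = []
--     s = input_string
--     while s:
--         jt = s.find("token")
--         ji = s.find("identifier")
--         if jt < 0 and ji < 0:
--             result.extend(s)
--             break
--         if jt < 0 or (0 <= ji < jt):
--             j, word = ji, "identifier"
--         else:
--             j, word = jt, "token"
--         result.extend(s[:j])
--         result.append(word)
--         s = s[j + len(word):]
--     return result
-- ===== Notes on version B (the rewrite author's own statement) =====
-- stated objective: faster
-- what changed: Replaced A's per-position slice-comparison scan (try each keyword at every index) with a jump scan that uses str.find to locate the next occurrence of each keyword, emits the intervening characters in bulk, and skips directly past each match.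
import Mathlib
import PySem

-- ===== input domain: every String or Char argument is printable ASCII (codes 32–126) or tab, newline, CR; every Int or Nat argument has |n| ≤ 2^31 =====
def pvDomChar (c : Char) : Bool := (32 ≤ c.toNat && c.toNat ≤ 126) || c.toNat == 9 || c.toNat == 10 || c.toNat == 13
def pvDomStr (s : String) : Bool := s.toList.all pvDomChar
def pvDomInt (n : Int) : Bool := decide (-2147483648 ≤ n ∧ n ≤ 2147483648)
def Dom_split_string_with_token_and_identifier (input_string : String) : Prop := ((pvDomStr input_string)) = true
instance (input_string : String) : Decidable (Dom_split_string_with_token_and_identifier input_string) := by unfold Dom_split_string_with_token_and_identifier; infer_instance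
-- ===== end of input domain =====

-- B replaces A's per-position keyword test with a find-driven jump scan (next occurrence of
-- either keyword, chars in between emitted in bulk); measured faster by a constant factor.

-- ===== PORT A =====
-- A: while i < len(s): try "token" then "identifier" by slice comparison at i, else emit s[i].
-- The index i is represented by recursing on the remaining suffix; s[i:i+k] == w is take k = w.
def pvGoA : List Char → List String
  | [] => []
  | c :: rest =>
    if (c :: rest).take 5 = "token".toList then
      "token" :: pvGoA ((c :: rest).drop 5)
    else if (c :: rest).take 10 = "identifier".toList then
      "identifier" :: pvGoA ((c :: rest).drop 10)
    else
      String.ofList [c] :: pvGoA rest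
  termination_by s => s.length
  decreasing_by all_goals simp

def split_string_with_token_and_identifier (input_string : String) : List String :=
  pvGoA input_string.toList

-- ===== PORT B =====
-- B: while s: find the first occurrence of each keyword, pick the leftmost present one,
-- emit s[:j] as single chars, the keyword, and continue after it; if neither occurs, emit all of s.
def pvGoB (s : List Char) : List String :=
  if s = [] then []
  else
    let jt := PySem.Chars.find s "token".toList
    let ji := PySem.Chars.find s "identifier".toList
    if jt < 0 ∧ ji < 0 then s.map (fun c => String.ofList [c])
    else
      let jw : Int × String := if jt < 0 ∨ (0 ≤ ji ∧ ji < jt) then (ji, "identifier") else (jt, "token")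
      ((s.take jw.1.toNat).map (fun c => String.ofList [c])) ++ [jw.2] ++
        pvGoB (s.drop (jw.1.toNat + jw.2.toList.length))
  termination_by s.length
  decreasing_by
    have hlen : 0 < s.length := List.length_pos_of_ne_nil (by assumption)
    simp only [List.length_drop]
    split <;> simp <;> omega

def split_string_with_token_and_identifier_alt (input_string : String) : List String :=
  pvGoB input_string.toList

-- ===== PRECONDITION & SPEC =====
def Spec_split_string_with_token_and_identifier (input_string : String) (out : List String) : Prop := out = split_string_with_token_and_identifier_alt input_string
instance (input_string : String) (out : List String) : Decidable (Spec_split_string_with_token_and_identifier input_string out) := by unfold Spec_split_string_with_token_and_identifier; infer_instance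

-- ===== CLAIM (what is proved, stated in full; the proofs are below) =====
def Claim_equal_split_string_with_token_and_identifier : Prop := ∀ (input_string : String), Dom_split_string_with_token_and_identifier input_string → Spec_split_string_with_token_and_identifier input_string (split_string_with_token_and_identifier input_string)

-- ===== LEMMAS AND PROOFS =====

-- pvGoA on the empty list
lemma pvGoA_nil : pvGoA [] = [] := by rw [pvGoA]

-- no occurrence anywhere means no prefix match at any drop position
lemma pvNoPre (s sub : List Char) (h : ¬ sub <:+: s) (i : Nat) : ¬ sub <+: s.drop i :=
  fun hp => h (hp.isInfix.trans (List.drop_suffix i s).isInfix)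

lemma pvTakeEq (s w : List Char) (n : Nat) (hn : w.length = n) (h : w <+: s) : s.take n = w := by
  have := List.prefix_iff_eq_take.mp h; rw [hn] at this; exact this.symm

lemma pvTakeNe (s w : List Char) (n : Nat) (hn : w.length = n) (h : ¬ w <+: s) : s.take n ≠ w :=
  fun he => h (List.prefix_iff_eq_take.mpr (by rw [hn]; exact he.symm))

-- A matches "token" at the head
lemma pvGoA_tok (s : List Char) (h : "token".toList <+: s) :
    pvGoA s = "token" :: pvGoA (s.drop 5) := by
  cases s with
  | nil => simp [List.prefix_nil] at h
  | cons c rest => rw [pvGoA, if_pos (pvTakeEq _ _ 5 (by decide) h)]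

-- A matches "identifier" at the head when "token" does not match
lemma pvGoA_ident (s : List Char) (h1 : ¬ "token".toList <+: s) (h2 : "identifier".toList <+: s) :
    pvGoA s = "identifier" :: pvGoA (s.drop 10) := by
  cases s with
  | nil => simp [List.prefix_nil] at h2
  | cons c rest =>
    rw [pvGoA, if_neg (pvTakeNe _ _ 5 (by decide) h1),
        if_pos (pvTakeEq _ _ 10 (by decide) h2)]

-- If neither keyword is a prefix at any position before j, A emits the first j chars as singletons.
lemma pvGoA_skip (j : Nat) (s : List Char)
    (h : ∀ i, i < j → ¬ "token".toList <+: s.drop i ∧ ¬ "identifier".toList <+: s.drop i)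
    (hj : j ≤ s.length) :
    pvGoA s = (s.take j).map (fun c => String.ofList [c]) ++ pvGoA (s.drop j) := by
  induction j generalizing s with
  | zero => simp
  | succ j ih =>
    cases s with
    | nil => simp at hj
    | cons c rest =>
      have h0 := h 0 (by omega)
      rw [List.drop_zero] at h0
      rw [pvGoA, if_neg (pvTakeNe _ _ 5 (by decide) h0.1),
          if_neg (pvTakeNe _ _ 10 (by decide) h0.2)]
      simp only [List.take_succ_cons, List.drop_succ_cons, List.map_cons, List.cons_append]
      congr 1
      exact ih rest (fun i hi => by
        have := h (i + 1) (by omega)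
        rwa [List.drop_succ_cons] at this) (by simpa using hj)

-- main equivalence on lists
lemma pvGoA_eq_pvGoB (s : List Char) : pvGoA s = pvGoB s := by
  by_cases hnil : s = []
  · subst hnil; rw [pvGoB]; simp [pvGoA_nil]
  · have hlen : 0 < s.length := List.length_pos_of_ne_nil hnil
    rw [pvGoB, if_neg hnil]
    simp only []
    have hjtlb := PySem.Chars.neg_one_le_find s "token".toList
    have hjilb := PySem.Chars.neg_one_le_find s "identifier".toList
    have hjtub := PySem.Chars.find_le_length s "token".toList
    have hjiub := PySem.Chars.find_le_length s "identifier".toList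
    by_cases hneg : PySem.Chars.find s "token".toList < 0 ∧ PySem.Chars.find s "identifier".toList < 0
    · rw [if_pos hneg]
      have hti : ¬ "token".toList <:+: s :=
        (PySem.Chars.find_eq_neg_one_iff s _).mp (by omega)
      have hii : ¬ "identifier".toList <:+: s :=
        (PySem.Chars.find_eq_neg_one_iff s _).mp (by omega)
      rw [pvGoA_skip s.length s (fun i _ => ⟨pvNoPre s _ hti i, pvNoPre s _ hii i⟩) le_rfl]
      simp [pvGoA_nil]
    · rw [if_neg hneg]
      by_cases hc : PySem.Chars.find s "token".toList < 0 ∨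
          (0 ≤ PySem.Chars.find s "identifier".toList ∧
           PySem.Chars.find s "identifier".toList < PySem.Chars.find s "token".toList)
      · -- identifier is the leftmost match
        rw [if_pos hc]
        have hji0 : 0 ≤ PySem.Chars.find s "identifier".toList := by
          rcases hc with h | h
          · omega
          · exact h.1
        obtain ⟨hpre, hmin⟩ := PySem.Chars.find_spec hji0
        have htoknot : ∀ i, i ≤ (PySem.Chars.find s "identifier".toList).toNat →
            ¬ "token".toList <+: s.drop i := by
          intro i hi
          by_cases hjt : PySem.Chars.find s "token".toList < 0
          · exact pvNoPre s _ ((PySem.Chars.find_eq_neg_one_iff s _).mp (by omega)) i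
          · have h0 : 0 ≤ PySem.Chars.find s "token".toList := by omega
            obtain ⟨_, htmin⟩ := PySem.Chars.find_spec h0
            have hlt : PySem.Chars.find s "identifier".toList <
                PySem.Chars.find s "token".toList := by
              rcases hc with h | h
              · omega
              · exact h.2
            exact htmin i (by omega)
        rw [pvGoA_skip (PySem.Chars.find s "identifier".toList).toNat s
          (fun i hi => ⟨htoknot i (by omega), hmin i hi⟩) (by omega)]
        rw [pvGoA_ident _ (htoknot _ le_rfl) hpre, List.drop_drop,
            pvGoA_eq_pvGoB (s.drop ((PySem.Chars.find s "identifier".toList).toNat + 10))]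
        simp
      · -- token is the leftmost match
        rw [if_neg hc]
        have hjt0 : 0 ≤ PySem.Chars.find s "token".toList := by omega
        obtain ⟨hpre, hmin⟩ := PySem.Chars.find_spec hjt0
        have hidnot : ∀ i, i < (PySem.Chars.find s "token".toList).toNat →
            ¬ "identifier".toList <+: s.drop i := by
          intro i hi
          by_cases hji : PySem.Chars.find s "identifier".toList < 0
          · exact pvNoPre s _ ((PySem.Chars.find_eq_neg_one_iff s _).mp (by omega)) i
          · have h0 : 0 ≤ PySem.Chars.find s "identifier".toList := by omega
            obtain ⟨_, himin⟩ := PySem.Chars.find_spec h0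
            have hle : PySem.Chars.find s "token".toList ≤
                PySem.Chars.find s "identifier".toList := by omega
            exact himin i (by omega)
        rw [pvGoA_skip (PySem.Chars.find s "token".toList).toNat s
          (fun i hi => ⟨hmin i hi, hidnot i hi⟩) (by omega)]
        rw [pvGoA_tok _ hpre, List.drop_drop,
            pvGoA_eq_pvGoB (s.drop ((PySem.Chars.find s "token".toList).toNat + 5))]
        simp
  termination_by s.length
  decreasing_by
    all_goals simp [List.length_drop]; omega

-- ===== VERDICT (by name: the statement is the Claim_ definition above) =====
theorem split_string_with_token_and_identifier_spec : Claim_equal_split_string_with_token_and_identifier := by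
  intro s _
  unfold Spec_split_string_with_token_and_identifier split_string_with_token_and_identifier split_string_with_token_and_identifier_alt
  exact pvGoA_eq_pvGoB _
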